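-- pv_equiv track=rewrite | github.com/peter-haferl/prisoner_recidivism_classifier | clean_explore.py | offense_bin
-- ===== SOURCE A (Python) =====
-- def offense_bin(series):
--     """bins offenses into types of crime based on Bureau of Justice Statistics Offense Codes
--     (http://www.ncrp.info/SiteAssets/Lists/FAQ%20Agencies/EditForm/BJS%20Offense%20Codes.pdf)"""
--     copy = []
--     for x in series:
--         if x <= 180:
--             copy.append('violent crime')
--         elif x <= 335:
--             copy.append('property crime')
--         elif x <= 372:
--             copy.append('drug trafficking')
--         elif x <= 410:
--             copy.append('drug possession/use')
--         elif x <= 450: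
--             copy.append('drug crime unspecified')
--         elif x <= 542:
--             copy.append('noncompliance')
--         elif x <= 570:
--             copy.append('driving under the influence')
--         elif x <= 710:
--             copy.append('other')
--         else:
--             copy.append('federal nonviolent crime')
--     return copy
-- ===== SOURCE B (Python) =====
-- CUTS = [180, 335, 372, 410, 450, 542, 570, 710]
-- LABELS = ['violent crime', 'property crime', 'drug trafficking',
--           'drug possession/use', 'drug crime unspecified', 'noncompliance',
--           'driving under the influence', 'other', 'federal nonviolent crime']
--
--
-- def offense_bin(series):
--     """bins offenses into types of crime (Bureau of Justice Statistics Offense Codes)"""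
--     out = []
--     for x in series:
--         lo, hi = 0, len(CUTS)
--         while lo < hi:
--             mid = (lo + hi) // 2
--             if CUTS[mid] < x:
--                 lo = mid + 1
--             else:
--                 hi = mid
--         out.append(LABELS[lo])
--     return out
-- ===== Notes on version B (the rewrite author's own statement) =====
-- stated objective: idiomatic
-- what changed: Replaces the nine-way hard-coded if/elif chain with a threshold table plus a hand-written bisect_left binary search, so labels come from data rather than branches.
import Mathlib
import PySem

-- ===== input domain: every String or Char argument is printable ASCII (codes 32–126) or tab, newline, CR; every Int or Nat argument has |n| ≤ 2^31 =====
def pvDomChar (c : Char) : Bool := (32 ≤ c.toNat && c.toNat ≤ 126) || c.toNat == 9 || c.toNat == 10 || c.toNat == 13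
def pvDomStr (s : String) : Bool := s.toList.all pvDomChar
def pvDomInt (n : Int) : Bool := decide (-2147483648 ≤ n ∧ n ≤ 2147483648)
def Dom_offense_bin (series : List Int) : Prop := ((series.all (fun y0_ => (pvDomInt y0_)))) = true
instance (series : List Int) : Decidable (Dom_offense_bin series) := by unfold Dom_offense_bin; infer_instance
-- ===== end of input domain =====

-- B replaces A's nine-way if/elif chain by a threshold table and a hand-written
-- binary search over it (table-driven lookup instead of hard-coded branches); objective: idiomatic/alternative, not faster.

-- ===== PORT A =====
-- literal transliteration of A: a loop appending the label chosen by the if/elif chain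
def offense_bin (series : List Int) : List String :=
  series.foldl (fun copy x =>
    copy ++ [if x ≤ 180 then "violent crime"
      else if x ≤ 335 then "property crime"
      else if x ≤ 372 then "drug trafficking"
      else if x ≤ 410 then "drug possession/use"
      else if x ≤ 450 then "drug crime unspecified"
      else if x ≤ 542 then "noncompliance"
      else if x ≤ 570 then "driving under the influence"
      else if x ≤ 710 then "other"
      else "federal nonviolent crime"]) []

-- ===== PORT B =====
def cutsB : List Int := [180, 335, 372, 410, 450, 542, 570, 710]

def labelsB : List String :=
  ["violent crime", "property crime", "drug trafficking", "drug possession/use",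
   "drug crime unspecified", "noncompliance", "driving under the influence",
   "other", "federal nonviolent crime"]

-- Source B's `while lo < hi` binary-search loop; fuel 8 = len(CUTS) bounds the
-- iteration count (hi - lo shrinks every step, so fuel never runs out).
-- CUTS[mid] is ported as getD _ 0: 0 ≤ mid < 8 always holds, so it is exact.
def blGo (x : Int) : Nat → Nat → Nat → Nat
  | 0, lo, _ => lo
  | f+1, lo, hi =>
    if lo < hi then
      let mid := (lo + hi) / 2
      if cutsB.getD mid 0 < x then blGo x f (mid+1) hi else blGo x f lo mid
    else lo

-- LABELS[lo] ported as getD _ "": lo ≤ 8 = len(LABELS) - 1 always holds, so it is exact.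
def offense_bin_alt (series : List Int) : List String :=
  series.foldl (fun out x => out ++ [labelsB.getD (blGo x 8 0 8) ""]) []

-- ===== PRECONDITION & SPEC =====
def Spec_offense_bin (series : List Int) (out : List String) : Prop := out = offense_bin_alt series
instance (series : List Int) (out : List String) : Decidable (Spec_offense_bin series out) := by unfold Spec_offense_bin; infer_instance

-- ===== CLAIM (what is proved, stated in full; the proofs are below) =====
def Claim_equal_offense_bin : Prop := ∀ (series : List Int), Dom_offense_bin series → Spec_offense_bin series (offense_bin series)

-- ===== LEMMAS AND PROOFS =====

-- one unfolding of the while loop when lo < hi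
theorem blGo_step (x : Int) (f lo hi : Nat) (h : lo < hi) : blGo x (f+1) lo hi =
    if cutsB.getD ((lo+hi)/2) 0 < x then blGo x f ((lo+hi)/2+1) hi
    else blGo x f lo ((lo+hi)/2) := by rw [blGo]; rw [if_pos h]

-- the loop exits when lo = hi
theorem blGo_stop (x : Int) (f lo hi : Nat) (h : ¬ lo < hi) : blGo x (f+1) lo hi = lo := by
  rw [blGo]; rw [if_neg h]
theorem blLeaf0 (x : Int) (hB : x ≤ (180:Int)) : blGo x 8 0 8 = 0 := by
  rw [show (8:Nat) = 7+1 from rfl, blGo_step x 7 0 8 (by norm_num)]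
  norm_num [cutsB]
  rw [if_neg (show ¬ (450:Int) < x by omega)]
  rw [show (7:Nat) = 6+1 from rfl, blGo_step x 6 0 4 (by norm_num)]
  norm_num [cutsB]
  rw [if_neg (show ¬ (372:Int) < x by omega)]
  rw [show (6:Nat) = 5+1 from rfl, blGo_step x 5 0 2 (by norm_num)]
  norm_num [cutsB]
  rw [if_neg (show ¬ (335:Int) < x by omega)]
  rw [show (5:Nat) = 4+1 from rfl, blGo_step x 4 0 1 (by norm_num)]
  norm_num [cutsB]
  rw [if_neg (show ¬ (180:Int) < x by omega)]
  rw [show (4:Nat) = 3+1 from rfl, blGo_stop x 3 0 0 (by norm_num)]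

theorem blLeaf1 (x : Int) (hA : (180:Int) < x) (hB : x ≤ (335:Int)) : blGo x 8 0 8 = 1 := by
  rw [show (8:Nat) = 7+1 from rfl, blGo_step x 7 0 8 (by norm_num)]
  norm_num [cutsB]
  rw [if_neg (show ¬ (450:Int) < x by omega)]
  rw [show (7:Nat) = 6+1 from rfl, blGo_step x 6 0 4 (by norm_num)]
  norm_num [cutsB]
  rw [if_neg (show ¬ (372:Int) < x by omega)]
  rw [show (6:Nat) = 5+1 from rfl, blGo_step x 5 0 2 (by norm_num)]
  norm_num [cutsB]
  rw [if_neg (show ¬ (335:Int) < x by omega)]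
  rw [show (5:Nat) = 4+1 from rfl, blGo_step x 4 0 1 (by norm_num)]
  norm_num [cutsB]
  rw [if_pos (show (180:Int) < x by omega)]
  rw [show (4:Nat) = 3+1 from rfl, blGo_stop x 3 1 1 (by norm_num)]

theorem blLeaf2 (x : Int) (hA : (335:Int) < x) (hB : x ≤ (372:Int)) : blGo x 8 0 8 = 2 := by
  rw [show (8:Nat) = 7+1 from rfl, blGo_step x 7 0 8 (by norm_num)]
  norm_num [cutsB]
  rw [if_neg (show ¬ (450:Int) < x by omega)]
  rw [show (7:Nat) = 6+1 from rfl, blGo_step x 6 0 4 (by norm_num)]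
  norm_num [cutsB]
  rw [if_neg (show ¬ (372:Int) < x by omega)]
  rw [show (6:Nat) = 5+1 from rfl, blGo_step x 5 0 2 (by norm_num)]
  norm_num [cutsB]
  rw [if_pos (show (335:Int) < x by omega)]
  rw [show (5:Nat) = 4+1 from rfl, blGo_stop x 4 2 2 (by norm_num)]

theorem blLeaf3 (x : Int) (hA : (372:Int) < x) (hB : x ≤ (410:Int)) : blGo x 8 0 8 = 3 := by
  rw [show (8:Nat) = 7+1 from rfl, blGo_step x 7 0 8 (by norm_num)]
  norm_num [cutsB]
  rw [if_neg (show ¬ (450:Int) < x by omega)]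
  rw [show (7:Nat) = 6+1 from rfl, blGo_step x 6 0 4 (by norm_num)]
  norm_num [cutsB]
  rw [if_pos (show (372:Int) < x by omega)]
  rw [show (6:Nat) = 5+1 from rfl, blGo_step x 5 3 4 (by norm_num)]
  norm_num [cutsB]
  rw [if_neg (show ¬ (410:Int) < x by omega)]
  rw [show (5:Nat) = 4+1 from rfl, blGo_stop x 4 3 3 (by norm_num)]

theorem blLeaf4 (x : Int) (hA : (410:Int) < x) (hB : x ≤ (450:Int)) : blGo x 8 0 8 = 4 := by
  rw [show (8:Nat) = 7+1 from rfl, blGo_step x 7 0 8 (by norm_num)]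
  norm_num [cutsB]
  rw [if_neg (show ¬ (450:Int) < x by omega)]
  rw [show (7:Nat) = 6+1 from rfl, blGo_step x 6 0 4 (by norm_num)]
  norm_num [cutsB]
  rw [if_pos (show (372:Int) < x by omega)]
  rw [show (6:Nat) = 5+1 from rfl, blGo_step x 5 3 4 (by norm_num)]
  norm_num [cutsB]
  rw [if_pos (show (410:Int) < x by omega)]
  rw [show (5:Nat) = 4+1 from rfl, blGo_stop x 4 4 4 (by norm_num)]

theorem blLeaf5 (x : Int) (hA : (450:Int) < x) (hB : x ≤ (542:Int)) : blGo x 8 0 8 = 5 := by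
  rw [show (8:Nat) = 7+1 from rfl, blGo_step x 7 0 8 (by norm_num)]
  norm_num [cutsB]
  rw [if_pos (show (450:Int) < x by omega)]
  rw [show (7:Nat) = 6+1 from rfl, blGo_step x 6 5 8 (by norm_num)]
  norm_num [cutsB]
  rw [if_neg (show ¬ (570:Int) < x by omega)]
  rw [show (6:Nat) = 5+1 from rfl, blGo_step x 5 5 6 (by norm_num)]
  norm_num [cutsB]
  rw [if_neg (show ¬ (542:Int) < x by omega)]
  rw [show (5:Nat) = 4+1 from rfl, blGo_stop x 4 5 5 (by norm_num)]

theorem blLeaf6 (x : Int) (hA : (542:Int) < x) (hB : x ≤ (570:Int)) : blGo x 8 0 8 = 6 := by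
  rw [show (8:Nat) = 7+1 from rfl, blGo_step x 7 0 8 (by norm_num)]
  norm_num [cutsB]
  rw [if_pos (show (450:Int) < x by omega)]
  rw [show (7:Nat) = 6+1 from rfl, blGo_step x 6 5 8 (by norm_num)]
  norm_num [cutsB]
  rw [if_neg (show ¬ (570:Int) < x by omega)]
  rw [show (6:Nat) = 5+1 from rfl, blGo_step x 5 5 6 (by norm_num)]
  norm_num [cutsB]
  rw [if_pos (show (542:Int) < x by omega)]
  rw [show (5:Nat) = 4+1 from rfl, blGo_stop x 4 6 6 (by norm_num)]

theorem blLeaf7 (x : Int) (hA : (570:Int) < x) (hB : x ≤ (710:Int)) : blGo x 8 0 8 = 7 := by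
  rw [show (8:Nat) = 7+1 from rfl, blGo_step x 7 0 8 (by norm_num)]
  norm_num [cutsB]
  rw [if_pos (show (450:Int) < x by omega)]
  rw [show (7:Nat) = 6+1 from rfl, blGo_step x 6 5 8 (by norm_num)]
  norm_num [cutsB]
  rw [if_pos (show (570:Int) < x by omega)]
  rw [show (6:Nat) = 5+1 from rfl, blGo_step x 5 7 8 (by norm_num)]
  norm_num [cutsB]
  rw [if_neg (show ¬ (710:Int) < x by omega)]
  rw [show (5:Nat) = 4+1 from rfl, blGo_stop x 4 7 7 (by norm_num)]

theorem blLeaf8 (x : Int) (hA : (710:Int) < x) : blGo x 8 0 8 = 8 := by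
  rw [show (8:Nat) = 7+1 from rfl, blGo_step x 7 0 8 (by norm_num)]
  norm_num [cutsB]
  rw [if_pos (show (450:Int) < x by omega)]
  rw [show (7:Nat) = 6+1 from rfl, blGo_step x 6 5 8 (by norm_num)]
  norm_num [cutsB]
  rw [if_pos (show (570:Int) < x by omega)]
  rw [show (6:Nat) = 5+1 from rfl, blGo_step x 5 7 8 (by norm_num)]
  norm_num [cutsB]
  rw [if_pos (show (710:Int) < x by omega)]
  rw [show (5:Nat) = 4+1 from rfl, blGo_stop x 4 8 8 (by norm_num)]

-- per-element agreement: the if/elif chain picks LABELS[bisect_left(CUTS, x)]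
theorem elem_eq (x : Int) :
    (if x ≤ 180 then "violent crime"
      else if x ≤ 335 then "property crime"
      else if x ≤ 372 then "drug trafficking"
      else if x ≤ 410 then "drug possession/use"
      else if x ≤ 450 then "drug crime unspecified"
      else if x ≤ 542 then "noncompliance"
      else if x ≤ 570 then "driving under the influence"
      else if x ≤ 710 then "other"
      else "federal nonviolent crime") = labelsB.getD (blGo x 8 0 8) "" := by
  by_cases h1 : x ≤ 180
  · rw [blLeaf0 x h1]; simp [labelsB, h1]
  · by_cases h2 : x ≤ 335
    · rw [blLeaf1 x (by omega) h2]; simp [labelsB, h1, h2]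
    · by_cases h3 : x ≤ 372
      · rw [blLeaf2 x (by omega) h3]; simp [labelsB, h1, h2, h3]
      · by_cases h4 : x ≤ 410
        · rw [blLeaf3 x (by omega) h4]; simp [labelsB, h1, h2, h3, h4]
        · by_cases h5 : x ≤ 450
          · rw [blLeaf4 x (by omega) h5]; simp [labelsB, h1, h2, h3, h4, h5]
          · by_cases h6 : x ≤ 542
            · rw [blLeaf5 x (by omega) h6]; simp [labelsB, h1, h2, h3, h4, h5, h6]
            · by_cases h7 : x ≤ 570
              · rw [blLeaf6 x (by omega) h7]; simp [labelsB, h1, h2, h3, h4, h5, h6, h7]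
              · by_cases h8 : x ≤ 710
                · rw [blLeaf7 x (by omega) h8]; simp [labelsB, h1, h2, h3, h4, h5, h6, h7, h8]
                · rw [blLeaf8 x (by omega)]; simp [labelsB, h1, h2, h3, h4, h5, h6, h7, h8]

-- ===== VERDICT (by name: the statement is the Claim_ definition above) =====
theorem offense_bin_spec : Claim_equal_offense_bin := by
  intro series _
  unfold Spec_offense_bin offense_bin offense_bin_alt
  rw [PySem.List.foldl_append_singleton_eq_map, PySem.List.foldl_append_singleton_eq_map]
  exact List.map_congr_left (fun x _ => elem_eq x)
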